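-- pv_equiv track=rewrite | github.com/Kiars00/Gender-Gap-Analysis-ISTAT-vs-Paisa | dati_progetto/moduli/classe.py | estrai_contesto
-- ===== SOURCE A (Python) =====
-- def estrai_contesto(tokens, parola, finestra=5): #Funzione per estrarre contesti in cui compare una parola (contesto di 5 parole: finestra). Prende token, una parola, e la finestra
--     risultati = [] #lista per raccogliere i risultati del ciclo per i contesti trovati
--
--     for i, token in enumerate(tokens):
--         if token == parola:  #Calcolo intervallo della finestra intorno ala parola trovata: per prendere parole prima di i e quelle dopo
--             start = max(i - finestra, 0)
--             end = min(i + finestra + 1, len(tokens))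
--
--             contesto = " ".join(tokens[start:end]) #Ricostruisce il contesto dai token come stringa
--             risultati.append(contesto) #aggiungo il contesto alla lista dei risultati
--
--     return risultati
-- ===== SOURCE B (Python) =====
-- def estrai_contesto(tokens, parola, finestra=5):
--     # Streaming one-pass algorithm: keep a buffer whose last `finestra` entries are
--     # the tokens preceding the current one, plus a queue of still-open windows;
--     # each open window absorbs the following tokens until its right context is
--     # complete, then it is emitted.  The buffer is compacted in blocks (amortized O(1)).
--     risultati = []
--     precedenti = []   # recent tokens; only its last `finestra` entries are ever used
--     aperte = []       # open windows: [partial_window_tokens, tokens_still_needed]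
--     for tok in tokens:
--         ancora_aperte = []
--         for parziale, mancanti in aperte:
--             parziale.append(tok)
--             if mancanti == 1:
--                 risultati.append(" ".join(parziale))
--             else:
--                 ancora_aperte.append([parziale, mancanti - 1])
--         aperte = ancora_aperte
--         if tok == parola:
--             if finestra == 0:
--                 risultati.append(tok)
--             else:
--                 aperte.append([precedenti[-finestra:] + [tok], finestra])
--         if finestra > 0:
--             precedenti.append(tok)
--             if len(precedenti) > 2 * finestra:
--                 precedenti = precedenti[-finestra:]
--     for parziale, _ in aperte:
--         risultati.append(" ".join(parziale))
--     return risultati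
-- ===== Notes on version B (the rewrite author's own statement) =====
-- stated objective: alternative
-- what changed: B replaces A's per-match slicing of the whole token list by a single streaming pass that maintains a bounded buffer of the last `finestra` tokens plus a queue of still-open windows, each open window absorbing subsequent tokens until its right context is complete.
-- outside the precondition, e.g. on estrai_contesto(['a'], 'a', -1): A returns [''], B returns ['a']
import Mathlib
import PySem

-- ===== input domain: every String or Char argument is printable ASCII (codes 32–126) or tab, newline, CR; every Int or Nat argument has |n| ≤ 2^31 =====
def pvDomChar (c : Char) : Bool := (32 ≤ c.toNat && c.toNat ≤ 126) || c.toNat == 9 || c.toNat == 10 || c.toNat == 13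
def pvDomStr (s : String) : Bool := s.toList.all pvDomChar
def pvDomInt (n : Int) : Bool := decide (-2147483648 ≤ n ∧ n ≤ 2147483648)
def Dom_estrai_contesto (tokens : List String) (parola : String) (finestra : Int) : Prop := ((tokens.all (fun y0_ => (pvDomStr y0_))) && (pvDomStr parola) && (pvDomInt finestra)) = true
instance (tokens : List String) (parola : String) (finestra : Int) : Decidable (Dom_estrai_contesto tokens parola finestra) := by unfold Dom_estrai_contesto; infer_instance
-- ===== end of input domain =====

-- B is a streaming re-implementation (buffer of preceding tokens + queue of still-open
-- windows) of A's per-match whole-list slicing; proved equal on Pre_ (finestra ≥ 0, or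
-- the word absent).

-- ===== PORT A =====
-- single loop: on each matching token, slice the window out of the whole list and join it
def estrai_contesto (tokens : List String) (parola : String) (finestra : Int) : List String :=
  (PySem.List.enumerate tokens).foldl
    (fun risultati p =>
      if p.2 == parola then
        risultati ++ [PySem.Str.join " "
          (PySem.List.slice tokens (some (max (p.1 - finestra) 0))
            (some (min (p.1 + finestra + 1) (tokens.length : Int))))]
      else risultati) []

-- ===== PORT B =====
-- one streaming step of Source B's loop body; state = (risultati, precedenti, aperte)
def bStep (parola : String) (finestra : Int)
    (st : List String × List String × List (List String × Int)) (tok : String) :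
    List String × List String × List (List String × Int) :=
  let rn :=
    st.2.2.foldl
      (fun (rn : List String × List (List String × Int)) wm =>
        let parziale := wm.1 ++ [tok]
        if wm.2 == 1 then (rn.1 ++ [PySem.Str.join " " parziale], rn.2)
        else (rn.1, rn.2 ++ [(parziale, wm.2 - 1)]))
      (st.1, [])
  let rn2 :=
    if tok == parola then
      if finestra == 0 then (rn.1 ++ [tok], rn.2)
      else (rn.1, rn.2 ++ [(PySem.List.slice st.2.1 (some (-finestra)) none ++ [tok], finestra)])
    else rn
  let prec :=
    if finestra > 0 then
      let p := st.2.1 ++ [tok]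
      if (p.length : Int) > 2 * finestra then PySem.List.slice p (some (-finestra)) none else p
    else st.2.1
  (rn2.1, prec, rn2.2)

def estrai_contesto_alt (tokens : List String) (parola : String) (finestra : Int) : List String :=
  let st := tokens.foldl (bStep parola finestra) ([], [], [])
  st.1 ++ st.2.2.map (fun wm => PySem.Str.join " " wm.1)

-- ===== PRECONDITION & SPEC =====
-- Pre_ excludes only negative window sizes combined with an actual occurrence of
-- the word: there A returns an empty-string context per occurrence (artefact of an
-- empty slice whose start lies past its end), which B's streaming windows have no
-- reason to reproduce.
def Pre_estrai_contesto (tokens : List String) (parola : String) (finestra : Int) : Prop :=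
  0 ≤ finestra ∨ ¬ parola ∈ tokens
instance (tokens : List String) (parola : String) (finestra : Int) : Decidable (Pre_estrai_contesto tokens parola finestra) := by unfold Pre_estrai_contesto; infer_instance

def pvWitness_estrai_contesto : List String × String × Int := (["il", "gap", "di", "gap"], "gap", 1)

def Spec_estrai_contesto (tokens : List String) (parola : String) (finestra : Int) (out : List String) : Prop := out = estrai_contesto_alt tokens parola finestra
instance (tokens : List String) (parola : String) (finestra : Int) (out : List String) : Decidable (Spec_estrai_contesto tokens parola finestra out) := by unfold Spec_estrai_contesto; infer_instance

-- ===== CLAIM (what is proved, stated in full; the proofs are below) =====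
def Claim_equal_estrai_contesto : Prop := ∀ (tokens : List String) (parola : String) (finestra : Int), Dom_estrai_contesto tokens parola finestra → Pre_estrai_contesto tokens parola finestra → Spec_estrai_contesto tokens parola finestra (estrai_contesto tokens parola finestra)

-- ===== LEMMAS AND PROOFS =====

-- common normal form: the context windows of the matches inside `rest`,
-- `pre` being the already-seen prefix (only its last F tokens matter)
def ctxsFrom (parola : String) (F : Nat) : List String → List String → List String
  | _, [] => []
  | pre, t :: r =>
    (if t == parola then
      [PySem.Str.join " " (pre.drop (pre.length - F) ++ t :: r.take F)] else [])
    ++ ctxsFrom parola F (pre ++ [t]) r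

def flushB (st : List String × List String × List (List String × Int)) : List String :=
  st.1 ++ st.2.2.map (fun wm => PySem.Str.join " " wm.1)

-- the last-F-suffix of pre ++ [t] only depends on the last-F-suffix of pre
theorem lastN_snoc (pre : List String) (t : String) (F : Nat) :
    (pre ++ [t]).drop ((pre ++ [t]).length - F)
      = (pre.drop (pre.length - F) ++ [t]).drop ((pre.drop (pre.length - F) ++ [t]).length - F) := by
  rw [List.drop_append, List.drop_append]
  simp only [List.length_append, List.length_drop, List.length_cons, List.length_nil]
  rw [List.drop_drop]
  congr 2 <;> omega

-- ctxsFrom only depends on the last F tokens of pre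
theorem ctxsFrom_congr (parola : String) (F : Nat) (r : List String) :
    ∀ pre pre' : List String, pre.drop (pre.length - F) = pre'.drop (pre'.length - F) →
    ctxsFrom parola F pre r = ctxsFrom parola F pre' r := by
  induction r with
  | nil => intro pre pre' _; simp [ctxsFrom]
  | cons t r ih =>
    intro pre pre' h
    simp only [ctxsFrom, h]
    congr 1
    apply ih
    rw [lastN_snoc pre t F, lastN_snoc pre' t F, h]

-- the window slice of the full list, written zipper-style
theorem window_eq (pre r : List String) (t : String) (F : Nat) :
    ((pre ++ t :: r).drop (pre.length - F)).take
        (min (pre.length + F + 1) (pre ++ t :: r).length - (pre.length - F))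
      = pre.drop (pre.length - F) ++ t :: r.take F := by
  rw [List.drop_append_of_le_length (by omega)]
  rw [List.take_append]
  have hlen : (pre.drop (pre.length - F)).length = pre.length - (pre.length - F) := by simp
  rw [List.take_of_length_le (by simp [List.length_cons, List.length_append]; omega)]
  have hm : min (pre.length + F + 1) (pre ++ t :: r).length - (pre.length - F)
      - (pre.drop (pre.length - F)).length = min F r.length + 1 := by
    simp only [hlen, List.length_append, List.length_cons]; omega
  rw [hm, List.take_succ_cons]
  simp

-- ===== A side =====
theorem a_loop (parola : String) (f : Int) (F : Nat) (hf : f = (F : Int)) (full : List String) :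
    ∀ (rest pre : List String) (acc : List String), full = pre ++ rest →
    (PySem.List.enumerate rest (pre.length : Int)).foldl
      (fun risultati p =>
        if p.2 == parola then
          risultati ++ [PySem.Str.join " "
            (PySem.List.slice full (some (max (p.1 - f) 0))
              (some (min (p.1 + f + 1) (full.length : Int))))]
        else risultati) acc
    = acc ++ ctxsFrom parola F pre rest := by
  intro rest
  induction rest with
  | nil => intro pre acc _; simp [PySem.List.enumerate, ctxsFrom]
  | cons t r ih =>
    intro pre acc hfull
    rw [PySem.List.enumerate_cons, List.foldl_cons]
    have hcast : (pre.length : Int) + 1 = (((pre ++ [t]).length : Nat) : Int) := by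
      simp [List.length_append]
    rw [hcast, ih (pre ++ [t]) _ (by simp [hfull])]
    have hslice : PySem.List.slice full (some (max ((pre.length : Int) - f) 0))
          (some (min ((pre.length : Int) + f + 1) (full.length : Int)))
        = pre.drop (pre.length - F) ++ t :: r.take F := by
      subst hfull hf
      have h1 : max ((pre.length : Int) - (F : Int)) 0 = ((pre.length - F : Nat) : Int) := by omega
      have h2 : min ((pre.length : Int) + (F : Int) + 1) (((pre ++ t :: r).length : Nat) : Int)
          = ((min (pre.length + F + 1) (pre ++ t :: r).length : Nat) : Int) := by omega
      rw [h1, h2, PySem.List.slice_natCast]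
      exact window_eq pre r t F
    by_cases hm : (t == parola) = true
    · simp only [ctxsFrom, hm, if_pos, hslice]
      simp [List.append_assoc]
    · simp only [ctxsFrom, hm, if_neg, Bool.not_eq_true] at *
      simp [hm, ctxsFrom]

-- ===== B side =====
theorem b_loop_zero (parola : String) :
    ∀ (rest : List String) (ris pre : List String),
    flushB (rest.foldl (bStep parola 0) (ris, pre, []))
      = ris ++ ctxsFrom parola 0 pre rest := by
  intro rest
  induction rest with
  | nil => intro ris pre; simp [flushB, ctxsFrom]
  | cons t r ih =>
    intro ris pre
    rw [List.foldl_cons]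
    have hstep : bStep parola 0 (ris, pre, []) t
        = (ris ++ (if t == parola then [t] else []), pre, []) := by
      by_cases hm : (t == parola) = true <;> simp [bStep, hm]
    rw [hstep, ih]
    have hcg : ctxsFrom parola 0 (pre ++ [t]) r = ctxsFrom parola 0 pre r :=
      ctxsFrom_congr parola 0 r (pre ++ [t]) pre (by simp)
    simp only [ctxsFrom, hcg]
    by_cases hm : (t == parola) = true
    · simp [ctxsFrom, hm, List.append_assoc, PySem.Str.join]
    · simp only [Bool.not_eq_true] at hm
      simp [ctxsFrom, hm]

-- the inner loop over the open windows: emitted and kept windows, in order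
theorem b_inner (tok : String) :
    ∀ (ap : List (List String × Int)) (ris : List String) (nuove : List (List String × Int)),
    ap.foldl
      (fun (rn : List String × List (List String × Int)) wm =>
        let parziale := wm.1 ++ [tok]
        if wm.2 == 1 then (rn.1 ++ [PySem.Str.join " " parziale], rn.2)
        else (rn.1, rn.2 ++ [(parziale, wm.2 - 1)]))
      (ris, nuove)
    = (ris ++ (ap.filter (fun wm => wm.2 == 1)).map (fun wm => PySem.Str.join " " (wm.1 ++ [tok])),
       nuove ++ (ap.filter (fun wm => !(wm.2 == 1))).map (fun wm => (wm.1 ++ [tok], wm.2 - 1))) := by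
  intro ap
  induction ap with
  | nil => intro ris nuove; simp
  | cons wm tl ih =>
    intro ris nuove
    simp only [List.foldl_cons]
    by_cases h : (wm.2 == 1) = true
    · rw [show (wm.2 == 1) = true from h]
      simp only [if_true]
      rw [ih]
      simp [h, List.append_assoc]
    · have h' : (wm.2 == 1) = false := by simpa using h
      rw [h']
      simp only [Bool.false_eq_true, if_false]
      rw [ih]
      simp [h', List.append_assoc]

theorem b_loop_pos (parola : String) (f : Int) (F : Nat) (hf : f = (F : Int)) (hF : 1 ≤ F) :
    ∀ (rest ris pre : List String) (aperte : List (List String × Int)),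
    (∀ p ∈ aperte, 1 ≤ p.2 ∧ p.2 ≤ f) →
    (aperte.map Prod.snd).Pairwise (· < ·) →
    flushB (rest.foldl (bStep parola f) (ris, pre, aperte))
      = ris ++ aperte.map (fun wm => PySem.Str.join " " (wm.1 ++ rest.take wm.2.toNat))
            ++ ctxsFrom parola F pre rest := by
  intro rest
  induction rest with
  | nil =>
    intro ris pre aperte _ _
    simp [flushB, ctxsFrom]
  | cons t r ih =>
    intro ris pre aperte hinv hpw
    have hsl : ∀ l : List String, PySem.List.slice l (some (-f)) none
        = l.drop (l.length - F) := by
      intro l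
      rw [hf]
      exact PySem.List.slice_from_neg_natCast l F (by omega)
    rw [List.foldl_cons]
    have hf0 : (f == 0) = false := by simp [hf]; omega
    have hfgt : (0 : Int) < f := by omega
    have hstep : bStep parola f (ris, pre, aperte) t
        = (ris ++ (aperte.filter (fun wm => wm.2 == 1)).map
              (fun wm => PySem.Str.join " " (wm.1 ++ [t])),
           (if ((pre ++ [t]).length : Int) > 2 * f then
              (pre ++ [t]).drop ((pre ++ [t]).length - F) else pre ++ [t]),
           (aperte.filter (fun wm => !(wm.2 == 1))).map (fun wm => (wm.1 ++ [t], wm.2 - 1))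
             ++ (if t == parola then [(pre.drop (pre.length - F) ++ [t], f)] else [])) := by
      unfold bStep
      rw [b_inner]
      by_cases hm : (t == parola) = true <;>
        simp [hm, hf0, hfgt, hsl]
    rw [hstep]
    have hmem2 : ∀ p ∈ aperte.filter (fun wm => !(wm.2 == 1)), 2 ≤ p.2 ∧ p.2 ≤ f := by
      intro p hp
      rw [List.mem_filter] at hp
      have h1 := hinv p hp.1
      have h2 := hp.2
      simp only [Bool.not_eq_eq_eq_not, Bool.not_true, beq_eq_false_iff_ne, ne_eq] at h2
      exact ⟨by omega, h1.2⟩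
    have hinv' : ∀ p ∈ (aperte.filter (fun wm => !(wm.2 == 1))).map
          (fun wm => (wm.1 ++ [t], wm.2 - 1))
          ++ (if t == parola then [(pre.drop (pre.length - F) ++ [t], f)] else []),
        1 ≤ p.2 ∧ p.2 ≤ f := by
      intro p hp
      rw [List.mem_append] at hp
      rcases hp with hp | hp
      · rw [List.mem_map] at hp
        obtain ⟨q, hq, rfl⟩ := hp
        have := hmem2 q hq
        constructor <;> simp <;> omega
      · by_cases hm : (t == parola) = true
        · simp only [hm, if_true, List.mem_singleton] at hp
          subst hp
          exact ⟨by omega, le_refl f⟩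
        · simp [hm] at hp
    have hpw' : (((aperte.filter (fun wm => !(wm.2 == 1))).map
          (fun wm : List String × Int => (wm.1 ++ [t], wm.2 - 1))
          ++ (if t == parola then [(pre.drop (pre.length - F) ++ [t], f)] else [])).map
            Prod.snd).Pairwise (· < ·) := by
      rw [List.map_append, List.pairwise_append]
      refine ⟨?_, ?_, ?_⟩
      · rw [List.map_map, List.pairwise_map]
        have h0 : aperte.Pairwise (fun a b : List String × Int => a.2 < b.2) :=
          List.pairwise_map.mp hpw
        exact (h0.filter _).imp (fun {a b} h => by
          show a.2 - 1 < b.2 - 1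
          omega)
      · by_cases hm : (t == parola) = true <;> simp [hm]
      · intro x hx y hy
        rw [List.map_map, List.mem_map] at hx
        obtain ⟨q, hq, rfl⟩ := hx
        have := hmem2 q hq
        by_cases hm : (t == parola) = true <;> simp [hm] at hy
        subst hy
        simp
        omega
    rw [ih _ _ _ hinv' hpw']
    have hdp : (if ((pre ++ [t]).length : Int) > 2 * f then
            (pre ++ [t]).drop ((pre ++ [t]).length - F) else pre ++ [t]).drop
          ((if ((pre ++ [t]).length : Int) > 2 * f then
            (pre ++ [t]).drop ((pre ++ [t]).length - F) else pre ++ [t]).length - F)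
        = (pre ++ [t]).drop ((pre ++ [t]).length - F) := by
      by_cases hc : (((pre ++ [t]).length : Int) > 2 * f)
      · rw [if_pos hc, List.drop_drop]
        congr 1
        simp only [List.length_drop, List.length_append, List.length_cons, List.length_nil]
        omega
      · rw [if_neg hc]
    rw [ctxsFrom_congr parola F r _ (pre ++ [t]) hdp]
    have hstar : (aperte.filter (fun wm => wm.2 == 1)).map
          (fun wm => PySem.Str.join " " (wm.1 ++ [t]))
        ++ ((aperte.filter (fun wm => !(wm.2 == 1))).map
              (fun wm => (wm.1 ++ [t], wm.2 - 1))).map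
            (fun wm => PySem.Str.join " " (wm.1 ++ r.take wm.2.toNat))
        = aperte.map (fun wm => PySem.Str.join " " (wm.1 ++ (t :: r).take wm.2.toNat)) := by
      have hpt : ∀ q : List String × Int, q ∈ aperte → 2 ≤ q.2 →
          PySem.Str.join " " (q.1 ++ [t] ++ r.take (q.2 - 1).toNat)
            = PySem.Str.join " " (q.1 ++ (t :: r).take q.2.toNat) := by
        intro q _ h2
        have ht : q.2.toNat = (q.2 - 1).toNat + 1 := by omega
        rw [ht, List.take_succ_cons, List.append_assoc]
        rfl
      rcases haa : aperte with _ | ⟨⟨w, m⟩, tl⟩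
      · simp
      · have hpw2 : List.Pairwise (· < · : Int → Int → Prop) (m :: tl.map Prod.snd) := by
          simpa [haa] using hpw
        have htl : ∀ q ∈ tl, m < q.2 := by
          intro q hq
          exact List.rel_of_pairwise_cons hpw2 (List.mem_map_of_mem (f := Prod.snd) hq)
        have hm1 := hinv ⟨w, m⟩ (by simp [haa])
        by_cases h1 : (m == 1) = true
        · simp only [beq_iff_eq] at h1
          subst h1
          have htl1 : ∀ q ∈ tl, 2 ≤ q.2 := by intro q hq; have := htl q hq; omega
          have hfe : tl.filter (fun wm => wm.2 == 1) = [] := by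
            rw [List.filter_eq_nil_iff]
            intro q hq
            have := htl1 q hq
            simp
            omega
          have hfs : tl.filter (fun wm => !(wm.2 == 1)) = tl := by
            rw [List.filter_eq_self]
            intro q hq
            have := htl1 q hq
            simp
            omega
          simp only [List.filter_cons, hfe, hfs]
          simp only [show ((1 : Int) == 1) = true by decide, Bool.not_true, if_true,
            Bool.false_eq_true, if_false, List.map_cons, List.map_nil, List.map_map]
          simp only [List.cons_append, List.nil_append]
          congr 1
          apply List.map_congr_left
          intro q hq
          have hb : 2 ≤ q.2 := htl1 q hq
          have h' : List.take q.2.toNat (t :: r) = t :: List.take (q.2.toNat - 1) r := by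
            rcases hbn : q.2.toNat with _ | k
            · omega
            · simp
          simp only [Function.comp, h']
          have hnn : (q.2 - 1).toNat = q.2.toNat - 1 := by omega
          rw [hnn, List.append_assoc]
          simp
        · have hm2 : 2 ≤ m := by
            simp only [beq_iff_eq] at h1
            omega
          have hall : ∀ q ∈ (⟨w, m⟩ :: tl : List (List String × Int)), 2 ≤ q.2 := by
            intro q hq
            rcases List.mem_cons.mp hq with rfl | hq
            · exact hm2
            · have := htl q hq; omega
          have hfe : (⟨w, m⟩ :: tl : List (List String × Int)).filter
              (fun wm => wm.2 == 1) = [] := by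
            rw [List.filter_eq_nil_iff]
            intro q hq
            have := hall q hq
            simp
            omega
          have hfs : (⟨w, m⟩ :: tl : List (List String × Int)).filter
              (fun wm => !(wm.2 == 1)) = ⟨w, m⟩ :: tl := by
            rw [List.filter_eq_self]
            intro q hq
            have := hall q hq
            simp
            omega
          rw [hfe, hfs]
          simp only [List.map_nil, List.nil_append, List.map_map]
          apply List.map_congr_left
          intro q hq
          have := hall q hq
          simpa using hpt q (by rw [haa]; exact hq) this
    have hnew : ((if t == parola then [(pre.drop (pre.length - F) ++ [t], f)] else [])
            : List (List String × Int)).map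
          (fun wm => PySem.Str.join " " (wm.1 ++ r.take wm.2.toNat))
        = (if t == parola then
            [PySem.Str.join " " (pre.drop (pre.length - F) ++ t :: r.take F)] else []) := by
      have hfn : f.toNat = F := by omega
      by_cases hm : (t == parola) = true <;> simp [hm, hfn, List.append_assoc]
    simp only [List.map_append, hnew, ctxsFrom]
    rw [← hstar]
    simp [List.append_assoc]

-- when the word never occurs, A's loop appends nothing
theorem a_nomatch (parola : String) (f : Int) :
    ∀ (l : List String) (s : Int) (acc : List String) (full : List String),
    (∀ t ∈ l, (t == parola) = false) →
    (PySem.List.enumerate l s).foldl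
      (fun risultati p =>
        if p.2 == parola then
          risultati ++ [PySem.Str.join " "
            (PySem.List.slice full (some (max (p.1 - f) 0))
              (some (min (p.1 + f + 1) (full.length : Int))))]
        else risultati) acc = acc := by
  intro l
  induction l with
  | nil => intro s acc full _; simp [PySem.List.enumerate]
  | cons t r ih =>
    intro s acc full h
    rw [PySem.List.enumerate_cons, List.foldl_cons]
    simp only [h t (by simp), Bool.false_eq_true, if_false]
    exact ih (s + 1) acc full (fun q hq => h q (by simp [hq]))

-- when the word never occurs, B's streaming loop emits nothing
theorem b_nomatch (parola : String) (f : Int) :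
    ∀ (l : List String) (ris prec : List String),
    (∀ t ∈ l, (t == parola) = false) →
    flushB (l.foldl (bStep parola f) (ris, prec, [])) = ris := by
  intro l
  induction l with
  | nil => intro ris prec _; simp [flushB]
  | cons t r ih =>
    intro ris prec h
    rw [List.foldl_cons]
    have hstep : bStep parola f (ris, prec, []) t
        = (ris,
           (if f > 0 then
              (if (((prec ++ [t]).length : Int) > 2 * f) then
                PySem.List.slice (prec ++ [t]) (some (-f)) none else prec ++ [t])
            else prec), []) := by
      unfold bStep
      simp [h t (by simp)]
    rw [hstep]
    exact ih _ _ (fun q hq => h q (by simp [hq]))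

-- ===== VERDICT (by name: the statement is the Claim_ definition above) =====
theorem estrai_contesto_spec : Claim_equal_estrai_contesto := by
  intro tokens parola finestra _ hpre
  unfold Spec_estrai_contesto
  rcases hpre with hpre | hnm
  case inr =>
    have hno : ∀ t ∈ tokens, (t == parola) = false := by
      intro t ht
      simp only [beq_eq_false_iff_ne, ne_eq]
      intro h
      exact hnm (h ▸ ht)
    have hA : estrai_contesto tokens parola finestra = [] := by
      unfold estrai_contesto
      exact a_nomatch parola finestra tokens 0 [] tokens hno
    have hB : estrai_contesto_alt tokens parola finestra = [] := by
      unfold estrai_contesto_alt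
      exact b_nomatch parola finestra tokens [] [] hno
    rw [hA, hB]
  have hf : finestra = ((finestra.toNat : Nat) : Int) := (Int.toNat_of_nonneg hpre).symm
  have hA : estrai_contesto tokens parola finestra = ctxsFrom parola finestra.toNat [] tokens := by
    unfold estrai_contesto
    have := a_loop parola finestra finestra.toNat hf tokens tokens [] [] (by simp)
    simpa using this
  have hB : estrai_contesto_alt tokens parola finestra = ctxsFrom parola finestra.toNat [] tokens := by
    unfold estrai_contesto_alt
    rcases Nat.eq_zero_or_pos finestra.toNat with h0 | h1
    · have hf0 : finestra = 0 := by omega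
      subst hf0
      have := b_loop_zero parola tokens [] []
      simpa [flushB] using this
    · have := b_loop_pos parola finestra finestra.toNat hf h1 tokens [] [] []
        (by simp) (by simp)
      simpa [flushB] using this
  rw [hA, hB]
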